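-- pv_equiv track=rewrite | github.com/wesuuu/competitive-programming-practice | code-forces/data-structures/6-frog-jumps.py | check_jump
-- ===== SOURCE A (Python) =====
-- def check_jump(d, jump_arr):
--     start_position = -1
--     found_right = False
--     left = None
--     loops = 0
--     while True:
--         if start_position + 1 + d > len(jump_arr):
--             return True
--
--         for i in range(start_position+1, start_position+d+1):
--             j = jump_arr[i]
--             if j == 'R':
--                 start_position = i
--                 found_right = True
--                 break
--             if j == 'L' and not left:
--                 left = i
--         if left and not found_right:
--             start_position = left
--         elif not left and not found_right:
--             return False
--         found_right = False
--         left = None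
--         loops += 1
-- ===== SOURCE B (Python) =====
-- def check_jump(d, jump_arr):
--     n = len(jump_arr)
--     reach = -1
--     for i, c in enumerate(jump_arr):
--         if i > reach + d:
--             break
--         if c in 'LR':
--             reach = i
--     return reach + d >= n
-- ===== Notes on version B (the rewrite author's own statement) =====
-- stated objective: simpler
-- what changed: A re-simulates the frog hop by hop, rescanning a window of up to d cells at every hop for the first 'R' (else first usable 'L'); B is a short single left-to-right sweep that keeps the farthest pad reached so far and compares it with len-d at the end, relying on monotonicity of reachability.
-- intended difference: When jump_arr starts with 'L' and crossing is possible only by landing on that first pad (no other pad within the first window, the rest of the river crossable), A's 'if left' truthiness test treats the recorded index 0 as falsy, never lands there and returns False; B treats an 'L' pad at index 0 like any other pad and returns True, the intended reachability answer. — e.g. on check_jump(1, "L"): A returns false, B returns true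
import Mathlib
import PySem

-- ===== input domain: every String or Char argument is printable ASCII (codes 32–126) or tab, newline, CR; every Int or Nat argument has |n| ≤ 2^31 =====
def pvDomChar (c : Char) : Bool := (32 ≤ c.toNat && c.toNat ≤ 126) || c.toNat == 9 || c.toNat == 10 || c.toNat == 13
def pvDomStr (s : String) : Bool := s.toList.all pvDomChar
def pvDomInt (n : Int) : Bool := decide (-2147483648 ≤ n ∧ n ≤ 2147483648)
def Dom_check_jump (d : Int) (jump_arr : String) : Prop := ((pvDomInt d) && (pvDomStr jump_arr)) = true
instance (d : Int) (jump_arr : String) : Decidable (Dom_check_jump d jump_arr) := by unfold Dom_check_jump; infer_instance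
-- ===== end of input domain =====

-- B replaces A's hop-by-hop window rescanning with one left-to-right sweep keeping the
-- farthest pad reached; on strings starting with 'L' whose crossing needs that first pad,
-- A (truthiness bug on index 0) answers False, B answers True — stated below as D_.

-- ===== PORT A =====
-- jump_arr[i]; every read A performs is in range (the while-guard bounds the window),
-- so the `.getD ' '` default is never the value used
def pvCharAt (s : String) (i : Int) : Char := (PySem.Str.pyGet? s i).getD ' '

-- the `for i in range(start+1, start+d+1)` body: breaks at the first 'R' (found_right),
-- otherwise records the first L while `left` is falsy (None or 0 — Python truthiness)
def check_jump_inner (s : String) : List Int → Int → Bool → Option Int → Int × Bool × Option Int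
  | [], sp, fr, left => (sp, fr, left)
  | i :: rest, sp, fr, left =>
    let j := pvCharAt s i
    if j = 'R' then (i, true, left)
    else if j = 'L' ∧ (left = none ∨ left = some 0) then check_jump_inner s rest sp fr (some i)
    else check_jump_inner s rest sp fr left

-- the `while True` loop; state = start_position (found_right/left/loops are reset each
-- pass); the Nat fuel only makes the recursion total: each pass strictly increases
-- start_position, so the fuel len+2 chosen below is never exhausted (proved in loopA_iff)
def check_jump_loop (d : Int) (s : String) : Nat → Int → Bool
  | 0, _ => false
  | fuel + 1, sp =>
    if (s.length : Int) < sp + 1 + d then true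
    else
      let r := check_jump_inner s (PySem.List.pyRange (sp + 1) (sp + d + 1) 1) sp false none
      if r.2.1 = true then check_jump_loop d s fuel r.1
      else
        -- `if left and not found_right: start_position = left` (Python truthiness:
        -- left is truthy iff it is neither None nor 0, i.e. left.getD 0 ≠ 0)
        if r.2.2.getD 0 ≠ 0 then check_jump_loop d s fuel (r.2.2.getD 0)
        else false                          -- `elif not left and not found_right: return False`

def check_jump (d : Int) (jump_arr : String) : Bool := check_jump_loop d jump_arr (jump_arr.length + 2) (-1)

-- ===== PORT B =====
-- one pass over enumerate(jump_arr), keeping the farthest pad `reach` reached so far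
def check_jump_alt_loop (d : Int) : List Char → Int → Int → Int
  | [], _, reach => reach
  | c :: rest, i, reach =>
    if reach + d < i then reach                              -- `if i > reach + d: break`
    else if c = 'L' ∨ c = 'R' then check_jump_alt_loop d rest (i + 1) i   -- `if c in 'LR'`
    else check_jump_alt_loop d rest (i + 1) reach

def check_jump_alt (d : Int) (jump_arr : String) : Bool :=
  decide ((jump_arr.length : Int) ≤ check_jump_alt_loop d jump_arr.toList 0 (-1) + d)

-- ===== PRECONDITION & SPEC =====
-- is c a lily pad?
def pvPad (c : Char) : Bool := c == 'L' || c == 'R'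

-- On inputs whose first character is 'L' and where crossing is possible but only by
-- landing on that pad 0 (no pad at indices 1..d-1, every later length-d window of
-- cells holds a pad), A returns False — its `if left` truthiness test treats the
-- recorded index 0 as falsy, so A never lands on the first pad — while B returns
-- True, the intended reachability answer.
def D_check_jump (d : Int) (jump_arr : String) : Prop :=
  jump_arr.toList.head? = some 'L' ∧
  d.toNat ≤ jump_arr.toList.tail.findIdx pvPad + 1 ∧
  ∀ a ≤ jump_arr.length - d.toNat, ((jump_arr.toList.drop a).take d.toNat).any pvPad
instance (d : Int) (jump_arr : String) : Decidable (D_check_jump d jump_arr) := by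
  unfold D_check_jump; infer_instance

def Spec_check_jump (d : Int) (jump_arr : String) (out : Bool) : Prop :=
  ¬ D_check_jump d jump_arr → out = check_jump_alt d jump_arr
instance (d : Int) (jump_arr : String) (out : Bool) : Decidable (Spec_check_jump d jump_arr out) := by
  unfold Spec_check_jump; infer_instance

def pvDiffWitness_check_jump : Int × String := (1, "L")
def pvDiffWitnessOut_check_jump : Bool × Bool := (false, true)

-- ===== CLAIM (what is proved, stated in full; the proofs are below) =====
def Claim_unchanged_check_jump : Prop := ∀ (d : Int) (jump_arr : String), Dom_check_jump d jump_arr → Spec_check_jump d jump_arr (check_jump d jump_arr)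
def Claim_changed_check_jump : Prop := Dom_check_jump (pvDiffWitness_check_jump.1) (pvDiffWitness_check_jump.2) ∧ D_check_jump (pvDiffWitness_check_jump.1) (pvDiffWitness_check_jump.2) ∧ check_jump (pvDiffWitness_check_jump.1) (pvDiffWitness_check_jump.2) = pvDiffWitnessOut_check_jump.1 ∧ check_jump_alt (pvDiffWitness_check_jump.1) (pvDiffWitness_check_jump.2) = pvDiffWitnessOut_check_jump.2 ∧ pvDiffWitnessOut_check_jump.1 ≠ pvDiffWitnessOut_check_jump.2
def Claim_exact_check_jump : Prop := ∀ (d : Int) (jump_arr : String), Dom_check_jump d jump_arr → D_check_jump d jump_arr → check_jump d jump_arr ≠ check_jump_alt d jump_arr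

-- ===== LEMMAS AND PROOFS =====

-- the pads A may land on: 'R' anywhere, 'L' away from index 0 (truthiness bug)
def pvStoneA (s : String) (t : Int) : Prop :=
  0 ≤ t ∧ t < (s.length : Int) ∧ (pvCharAt s t = 'R' ∨ (pvCharAt s t = 'L' ∧ t ≠ 0))

-- the pads B may land on: any 'L' or 'R'
def pvStoneB (s : String) (t : Int) : Prop :=
  0 ≤ t ∧ t < (s.length : Int) ∧ (pvCharAt s t = 'R' ∨ pvCharAt s t = 'L')

-- "from position p the far bank n is reachable by hops of length ≤ d on `stone` pads"
inductive pvSucc (stone : Int → Prop) (d n : Int) : Int → Prop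
  | base (p : Int) : n ≤ p + d → pvSucc stone d n p
  | step (p t : Int) : p < t → t ≤ p + d → stone t → pvSucc stone d n t → pvSucc stone d n p

-- "position p is reachable from the start -1 by hops of length ≤ d on `stone` pads"
inductive pvChain (stone : Int → Prop) (d : Int) : Int → Prop
  | start : pvChain stone d (-1)
  | step (p t : Int) : pvChain stone d p → p < t → t ≤ p + d → stone t → pvChain stone d t

theorem pvSucc_mono (stone : Int → Prop) (d n : Int) (p : Int) (h : pvSucc stone d n p) :
    ∀ q, p ≤ q → pvSucc stone d n q := by
  induction h with
  | base p hp => exact fun q hq => pvSucc.base q (by omega)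
  | step p t hpt htd hst hsucc ih =>
    intro q hq
    by_cases hqt : q < t
    · exact pvSucc.step q t hqt (by omega) hst hsucc
    · exact ih q (by omega)

theorem chain_glue (stone : Int → Prop) (d : Int) (n : Int) (t : Int) (h : pvChain stone d t) :
    pvSucc stone d n t → pvSucc stone d n (-1) := by
  induction h with
  | start => exact id
  | step p u _ hpu hud hst ih => exact fun hsu => ih (pvSucc.step p u hpu hud hst hsu)

theorem succ_chain (stone : Int → Prop) (d n : Int) (p : Int) (h : pvSucc stone d n p) :
    pvChain stone d p → ∃ t, pvChain stone d t ∧ n ≤ t + d := by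
  induction h with
  | base p hp => exact fun hc => ⟨p, hc, hp⟩
  | step p t h1 h2 h3 _ ih => exact fun hc => ih (pvChain.step p t hc h1 h2 h3)

-- stone-set monotonicity and the bridge between A's and B's pads
theorem succA_to_succB (s : String) (d n : Int) (p : Int)
    (h : pvSucc (pvStoneA s) d n p) : pvSucc (pvStoneB s) d n p := by
  induction h with
  | base p hp => exact pvSucc.base p hp
  | step p t h1 h2 hst _ ih =>
    refine pvSucc.step p t h1 h2 ⟨hst.1, hst.2.1, ?_⟩ ih
    rcases hst.2.2 with h | h
    · exact Or.inl h
    · exact Or.inr h.1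

theorem succB_to_succA (s : String) (d n : Int) (p : Int)
    (h : pvSucc (pvStoneB s) d n p) : 0 ≤ p → pvSucc (pvStoneA s) d n p := by
  induction h with
  | base p hp => exact fun _ => pvSucc.base p hp
  | step p t h1 h2 hst _ ih =>
    intro hp
    refine pvSucc.step p t h1 h2 ⟨hst.1, hst.2.1, ?_⟩ (ih (by omega))
    rcases hst.2.2 with h | h
    · exact Or.inl h
    · exact Or.inr ⟨h, by omega⟩

-- inner loop once `left` is a truthy value (some t, t ≠ 0): left never changes, only 'R' breaks
theorem inner_set (s : String) : ∀ (k : Nat) (a b sp t : Int), (b - a).toNat ≤ k → t ≠ 0 →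
    (∃ u, check_jump_inner s (PySem.List.pyRange a b 1) sp false (some t) = (u, true, some t) ∧
      a ≤ u ∧ u < b ∧ pvCharAt s u = 'R') ∨
    (check_jump_inner s (PySem.List.pyRange a b 1) sp false (some t) = (sp, false, some t) ∧
      ∀ i, a ≤ i → i < b → pvCharAt s i ≠ 'R') := by
  intro k
  induction k with
  | zero =>
    intro a b sp t hk ht
    rw [PySem.List.pyRange_one_eq_nil (by omega)]
    exact Or.inr ⟨rfl, fun i h1 h2 => by omega⟩
  | succ k ih =>
    intro a b sp t hk ht
    by_cases hab : b ≤ a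
    · rw [PySem.List.pyRange_one_eq_nil hab]
      exact Or.inr ⟨rfl, fun i h1 h2 => by omega⟩
    · rw [PySem.List.pyRange_one_cons (by omega)]
      simp only [check_jump_inner]
      by_cases hR : pvCharAt s a = 'R'
      · rw [if_pos hR]
        exact Or.inl ⟨a, rfl, by omega, by omega, hR⟩
      · rw [if_neg hR, if_neg (by simp [ht])]
        rcases ih (a + 1) b sp t (by omega) ht with ⟨u, hu, h1, h2, h3⟩ | ⟨heq, hnoR⟩
        · exact Or.inl ⟨u, hu, by omega, h2, h3⟩
        · refine Or.inr ⟨heq, fun i hi1 hi2 => ?_⟩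
          rcases eq_or_lt_of_le hi1 with h | h
          · rw [← h]; exact hR
          · exact hnoR i (by omega) hi2

-- inner loop from a falsy `left` (none or some 0): either it breaks at an 'R' in the
-- window, or it returns start unchanged with `left` = a usable 'L' of the window, or a
-- still-falsy `left` and the window holds no pad A can use at all
theorem inner_spec (s : String) : ∀ (k : Nat) (a b sp : Int) (left : Option Int),
    (b - a).toNat ≤ k → (left = none ∨ left = some 0) →
    (∃ u lf, check_jump_inner s (PySem.List.pyRange a b 1) sp false left = (u, true, lf) ∧
      a ≤ u ∧ u < b ∧ pvCharAt s u = 'R') ∨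
    (∃ lf, check_jump_inner s (PySem.List.pyRange a b 1) sp false left = (sp, false, lf) ∧
      ((∃ u, lf = some u ∧ u ≠ 0 ∧ a ≤ u ∧ u < b ∧ pvCharAt s u = 'L') ∨
       ((lf = none ∨ lf = some 0) ∧
        ∀ i, a ≤ i → i < b → ¬ (pvCharAt s i = 'R' ∨ (pvCharAt s i = 'L' ∧ i ≠ 0))))) := by
  intro k
  induction k with
  | zero =>
    intro a b sp left hk hl
    rw [PySem.List.pyRange_one_eq_nil (by omega)]
    exact Or.inr ⟨left, rfl, Or.inr ⟨hl, fun i h1 h2 => by omega⟩⟩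
  | succ k ih =>
    intro a b sp left hk hl
    by_cases hab : b ≤ a
    · rw [PySem.List.pyRange_one_eq_nil hab]
      exact Or.inr ⟨left, rfl, Or.inr ⟨hl, fun i h1 h2 => by omega⟩⟩
    · rw [PySem.List.pyRange_one_cons (by omega)]
      simp only [check_jump_inner]
      by_cases hR : pvCharAt s a = 'R'
      · rw [if_pos hR]
        exact Or.inl ⟨a, left, rfl, by omega, by omega, hR⟩
      · rw [if_neg hR]
        by_cases hL : pvCharAt s a = 'L'
        · rw [if_pos ⟨hL, hl⟩]
          by_cases ha0 : a = 0
          · -- the recorded L is index 0: still falsy, keep scanning in falsy mode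
            rcases ih (a + 1) b sp (some a) (by omega) (Or.inr (by rw [ha0]))
              with ⟨u, lf, hu, h1, h2, h3⟩ | ⟨lf, heq, hrest⟩
            · exact Or.inl ⟨u, lf, hu, by omega, h2, h3⟩
            · refine Or.inr ⟨lf, heq, ?_⟩
              rcases hrest with ⟨u, h1, h2, h3, h4, h5⟩ | ⟨hfalsy, hnone⟩
              · exact Or.inl ⟨u, h1, h2, by omega, h4, h5⟩
              · refine Or.inr ⟨hfalsy, fun i hi1 hi2 => ?_⟩
                rcases eq_or_lt_of_le hi1 with h | h
                · rw [← h]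
                  rintro (hc | ⟨hc, hi0⟩)
                  · exact hR hc
                  · exact hi0 (by omega)
                · exact hnone i (by omega) hi2
          · -- the recorded L is truthy: switch to the set-left mode
            rcases inner_set s k (a + 1) b sp a (by omega) ha0
              with ⟨u, hu, h1, h2, h3⟩ | ⟨heq, hnoR⟩
            · exact Or.inl ⟨u, some a, hu, by omega, h2, h3⟩
            · exact Or.inr ⟨some a, heq, Or.inl ⟨a, rfl, ha0, by omega, by omega, hL⟩⟩
        · rw [if_neg (by rintro ⟨h, -⟩; exact hL h)]
          rcases ih (a + 1) b sp left (by omega) hl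
            with ⟨u, lf, hu, h1, h2, h3⟩ | ⟨lf, heq, hrest⟩
          · exact Or.inl ⟨u, lf, hu, by omega, h2, h3⟩
          · refine Or.inr ⟨lf, heq, ?_⟩
            rcases hrest with ⟨u, h1, h2, h3, h4, h5⟩ | ⟨hfalsy, hnone⟩
            · exact Or.inl ⟨u, h1, h2, by omega, h4, h5⟩
            · refine Or.inr ⟨hfalsy, fun i hi1 hi2 => ?_⟩
              rcases eq_or_lt_of_le hi1 with h | h
              · rw [← h]
                rintro (hc | ⟨hc, -⟩)
                · exact hR hc
                · exact hL hc
              · exact hnone i (by omega) hi2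

-- A's outer loop succeeds from sp exactly when the far bank is reachable from sp on A's pads
theorem loopA_iff (d : Int) (s : String) : ∀ (k : Nat) (sp : Int),
    (sp = -1 ∨ (0 ≤ sp ∧ sp < (s.length : Int))) → ((s.length : Int) - sp).toNat ≤ k →
    (check_jump_loop d s k sp = true ↔ pvSucc (pvStoneA s) d (s.length : Int) sp) := by
  intro k
  induction k with
  | zero => intro sp hsp hk; exfalso; omega
  | succ k ih =>
    intro sp hsp hk
    have hsp' : -1 ≤ sp := by rcases hsp with h | h <;> omega
    rw [check_jump_loop]
    by_cases hg : (s.length : Int) < sp + 1 + d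
    · rw [if_pos hg]
      simp only [true_iff]
      exact pvSucc.base sp (by omega)
    · rw [if_neg hg]
      rcases inner_spec s (sp + d + 1 - (sp + 1)).toNat (sp + 1) (sp + d + 1) sp none
          (le_refl _) (Or.inl rfl) with
        ⟨u, lf, hres, h1, h2, h3⟩ | ⟨lf, hres, hrest⟩
      · -- an 'R' was found at u: A recurses from u
        simp only [hres, if_true]
        have hust : pvStoneA s u := ⟨by omega, by omega, Or.inl h3⟩
        rw [ih u (Or.inr ⟨by omega, by omega⟩) (by omega)]
        constructor
        · exact fun h => pvSucc.step sp u (by omega) (by omega) hust h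
        · intro h
          cases h with
          | base _ hb => exact absurd hb (by omega)
          | step _ w hw1 hw2 hwst hwsucc =>
            by_cases hc : w ≤ u
            · exact pvSucc_mono (pvStoneA s) d (s.length : Int) w hwsucc u hc
            · exact pvSucc.step u w (by omega) (by omega) hwst hwsucc
      · simp only [hres, Bool.false_eq_true, if_false]
        rcases hrest with ⟨u, hlf, hu0, h1, h2, h3⟩ | ⟨hfalsy, hnostone⟩
        · -- no 'R', but a usable 'L' at u: A recurses from u
          subst hlf
          rw [if_pos (by simp [hu0])]
          simp only [Option.getD_some]
          have hust : pvStoneA s u := ⟨by omega, by omega, Or.inr ⟨h3, hu0⟩⟩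
          rw [ih u (Or.inr ⟨by omega, by omega⟩) (by omega)]
          constructor
          · exact fun h => pvSucc.step sp u (by omega) (by omega) hust h
          · intro h
            cases h with
            | base _ hb => exact absurd hb (by omega)
            | step _ w hw1 hw2 hwst hwsucc =>
              by_cases hc : w ≤ u
              · exact pvSucc_mono (pvStoneA s) d (s.length : Int) w hwsucc u hc
              · exact pvSucc.step u w (by omega) (by omega) hwst hwsucc
        · -- no usable pad in the window: A returns False, and no hop is possible
          have hfail : ∀ (h : pvSucc (pvStoneA s) d (s.length : Int) sp), False := by
            intro h
            cases h with
            | base _ hb => exact absurd hb (by omega)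
            | step _ w hw1 hw2 hwst hwsucc =>
              exact hnostone w (by omega) (by omega) hwst.2.2
          rcases hfalsy with h | h <;> subst h <;> simp <;> exact fun h => hfail h

theorem drop_head_char (s : String) (i : Int) (c : Char) (cs : List Char)
    (h0 : 0 ≤ i) (hdrop : s.toList.drop i.toNat = c :: cs) :
    i < (s.length : Int) ∧ pvCharAt s i = c ∧ cs = s.toList.drop (i.toNat + 1) := by
  have hlt : i.toNat < s.toList.length := by
    by_contra h
    rw [List.drop_eq_nil_of_le (by omega)] at hdrop
    cases hdrop
  have hlen : s.toList.length = s.length := by simp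
  rw [List.drop_eq_getElem_cons hlt] at hdrop
  have hc : s.toList[i.toNat] = c := (List.cons.injEq _ _ _ _ ▸ hdrop).1
  have hcs : cs = s.toList.drop (i.toNat + 1) := ((List.cons.injEq _ _ _ _ ▸ hdrop).2).symm
  refine ⟨by omega, ?_, hcs⟩
  unfold pvCharAt
  rw [← Int.toNat_of_nonneg h0, PySem.Str.pyGet?_natCast, List.getElem?_eq_getElem hlt]
  simp [hc]

-- B's sweep returns a reachable position that dominates every reachable position
theorem alt_spec (d : Int) (s : String) :
    ∀ (rest : List Char) (i r : Int), 0 ≤ i → rest = s.toList.drop i.toNat →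
    -1 ≤ r → r < i → pvChain (pvStoneB s) d r →
    (∀ t, pvStoneB s t → t < i → t ≤ r + d → t ≤ r) →
    pvChain (pvStoneB s) d (check_jump_alt_loop d rest i r) ∧
      ∀ t, pvChain (pvStoneB s) d t → t ≤ check_jump_alt_loop d rest i r := by
  intro rest
  induction rest with
  | nil =>
    intro i r h0 hdrop hr1 hr2 hchain hinv
    simp only [check_jump_alt_loop]
    have hlen : (s.length : Int) ≤ i := by
      have hl := congrArg List.length hdrop
      simp [List.length_drop] at hl
      omega
    refine ⟨hchain, ?_⟩
    intro t ht
    induction ht with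
    | start => omega
    | step p u hp hpu hud hst ihp =>
      have hu : u < (s.length : Int) := hst.2.1
      exact hinv u hst (by omega) (by omega)
  | cons c cs ih =>
    intro i r h0 hdrop hr1 hr2 hchain hinv
    obtain ⟨hilen, hchar, hcs⟩ := drop_head_char s i c cs h0 hdrop.symm
    rw [check_jump_alt_loop]
    by_cases hbr : r + d < i
    · rw [if_pos hbr]
      refine ⟨hchain, ?_⟩
      intro t ht
      induction ht with
      | start => omega
      | step p u hp hpu hud hst ihp => exact hinv u hst (by omega) (by omega)
    · rw [if_neg hbr]
      by_cases hstc : c = 'L' ∨ c = 'R'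
      · rw [if_pos hstc]
        have hst : pvStoneB s i := by
          refine ⟨h0, hilen, ?_⟩
          rcases hstc with h | h
          · exact Or.inr (by rw [hchar, h])
          · exact Or.inl (by rw [hchar, h])
        exact ih (i + 1) i (by omega) (by rw [hcs]; congr 1; omega) (by omega) (by omega)
          (pvChain.step r i hchain (by omega) (by omega) hst)
          (fun t ht' h1 h2 => by omega)
      · rw [if_neg hstc]
        apply ih (i + 1) r (by omega) (by rw [hcs]; congr 1; omega) hr1 (by omega) hchain
        intro t hstt h1 h2
        by_cases hti : t < i
        · exact hinv t hstt hti h2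
        · exfalso
          have hteq : t = i := by omega
          subst hteq
          apply hstc
          rcases hstt.2.2 with h | h
          · exact Or.inr (by rw [← hchar]; exact h)
          · exact Or.inl (by rw [← hchar]; exact h)

-- the ports compute reachability over their respective pad sets
theorem A_iff (d : Int) (s : String) :
    check_jump d s = true ↔ pvSucc (pvStoneA s) d (s.length : Int) (-1) :=
  loopA_iff d s (s.length + 2) (-1) (Or.inl rfl) (by omega)

theorem B_iff (d : Int) (s : String) :
    check_jump_alt d s = true ↔ pvSucc (pvStoneB s) d (s.length : Int) (-1) := by
  have halt := alt_spec d s s.toList 0 (-1) le_rfl (by simp) (by omega) (by omega)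
    pvChain.start (fun t ht h1 h2 => absurd ht.1 (by omega))
  have key : pvSucc (pvStoneB s) d (s.length : Int) (-1) ↔
      (s.length : Int) ≤ check_jump_alt_loop d s.toList 0 (-1) + d := by
    constructor
    · intro h
      obtain ⟨t, hc, hlen⟩ := succ_chain (pvStoneB s) d (s.length : Int) (-1) h pvChain.start
      have := halt.2 t hc
      omega
    · exact fun h => chain_glue (pvStoneB s) d (s.length : Int) _ halt.1 (pvSucc.base _ h)
  unfold check_jump_alt
  rw [decide_eq_true_iff]
  exact key.symm

-- bridges between D_'s pad conditions and the stone predicates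
theorem charAt_get (s : String) (i : Int) (h0 : 0 ≤ i) (h1 : i < (s.length : Int)) :
    PySem.Str.pyGet? s i = some (pvCharAt s i) := by
  have hlt : i.toNat < s.toList.length := by simp; omega
  unfold pvCharAt
  rw [← Int.toNat_of_nonneg h0, PySem.Str.pyGet?_natCast, List.getElem?_eq_getElem hlt]
  rfl

theorem charAt_getElem (s : String) (t : Int) (h0 : 0 ≤ t) (hlt : t.toNat < s.toList.length) :
    pvCharAt s t = s.toList[t.toNat] := by
  have h : pvCharAt s ((t.toNat : Nat) : Int) = s.toList[t.toNat] := by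
    unfold pvCharAt
    rw [PySem.Str.pyGet?_natCast, List.getElem?_eq_getElem hlt]
    rfl
  rwa [Int.toNat_of_nonneg h0] at h

theorem padChar_iff (c : Char) : pvPad c = true ↔ (c = 'L' ∨ c = 'R') := by
  simp [pvPad]

-- basic consequences of D_'s conjuncts
theorem D_bounds (d : Int) (s : String) (h0 : s.toList.head? = some 'L')
    (hc3 : d.toNat ≤ s.toList.tail.findIdx pvPad + 1)
    (hc5 : ∀ a ≤ s.length - d.toNat, ((s.toList.drop a).take d.toNat).any pvPad = true) :
    1 ≤ d ∧ d ≤ (s.length : Int) ∧ 0 < s.length := by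
  rw [List.head?_eq_getElem?] at h0
  obtain ⟨hlt0, -⟩ := List.getElem?_eq_some_iff.mp h0
  have hn : 0 < s.length := by simpa using hlt0
  have hd1 : 1 ≤ d := by
    by_contra hd
    have h := hc5 0 (by omega)
    rw [show d.toNat = 0 by omega] at h
    simp at h
  have hfl : s.toList.tail.findIdx pvPad ≤ s.toList.tail.length := List.findIdx_le_length
  have hdn : d ≤ (s.length : Int) := by simp [List.length_tail] at hfl; omega
  exact ⟨hd1, hdn, hn⟩

-- the findIdx conjunct of D_ says: no pad at any index in [1, d)
theorem no_pad_of_c3 (s : String) (d : Int)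
    (hc3 : d.toNat ≤ s.toList.tail.findIdx pvPad + 1)
    (t : Int) (h1 : 1 ≤ t) (h2 : t < d) (h3 : t < (s.length : Int)) :
    pvPad (pvCharAt s t) = false := by
  have hjl : t.toNat - 1 < s.toList.tail.length := by simp; omega
  have hlt : t.toNat - 1 < s.toList.tail.findIdx pvPad := by omega
  have hnp := List.not_of_lt_findIdx hlt
  simp only [List.getElem_tail] at hnp
  simp only [show t.toNat - 1 + 1 = t.toNat by omega] at hnp
  rw [charAt_getElem s t (by omega) (by simp; omega)]
  simpa using hnp

-- the quantified conjunct of D_ says: every length-d window holds a pad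
theorem pad_of_c5 (s : String) (d : Int) (hd : 1 ≤ d)
    (hc5 : ∀ a ≤ s.length - d.toNat, ((s.toList.drop a).take d.toNat).any pvPad = true)
    (a : Int) (h1 : 0 ≤ a) (h2 : a + d ≤ (s.length : Int)) :
    ∃ t : Int, a ≤ t ∧ t < a + d ∧ t < (s.length : Int) ∧ pvPad (pvCharAt s t) = true := by
  have h := hc5 a.toNat (by omega)
  obtain ⟨x, hx, hpx⟩ := List.any_eq_true.mp h
  obtain ⟨j, hj, hxj⟩ := List.mem_iff_getElem.mp hx
  have hlen : s.toList.length = s.length := by simp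
  have hjb : j < d.toNat ∧ a.toNat + j < s.toList.length := by
    rw [List.length_take, List.length_drop, Nat.lt_min] at hj
    omega
  refine ⟨a + j, by omega, by omega, by omega, ?_⟩
  simp only [List.getElem_take, List.getElem_drop] at hxj
  rw [charAt_getElem s (a + j) (by omega) (by omega)]
  simp only [show (a + (j : Int)).toNat = a.toNat + j by omega, hxj]
  exact hpx

theorem D_to_succB (d : Int) (s : String) (hD : D_check_jump d s) :
    pvSucc (pvStoneB s) d (s.length : Int) (-1) := by
  obtain ⟨h0, hc3, hc5⟩ := hD
  obtain ⟨hd1, hdn, hn⟩ := D_bounds d s h0 hc3 hc5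
  rw [List.head?_eq_getElem?] at h0
  have h0n : (0 : Int) < (s.length : Int) := by omega
  have hc0 : pvCharAt s 0 = 'L' := by
    unfold pvCharAt
    rw [show (0 : Int) = ((0 : Nat) : Int) from rfl, PySem.Str.pyGet?_natCast, h0]
    rfl
  have hst0 : pvStoneB s 0 := ⟨le_refl 0, h0n, Or.inr hc0⟩
  have stoneOf : ∀ t : Int, 0 ≤ t → t < (s.length : Int) → pvPad (pvCharAt s t) = true →
      pvStoneB s t := by
    intro t ht1 ht2 hp
    refine ⟨ht1, ht2, ?_⟩
    rcases (padChar_iff _).mp hp with h | h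
    · exact Or.inr h
    · exact Or.inl h
  have reach : ∀ (k : Nat) (p : Int), 1 ≤ p → p < (s.length : Int) →
      ((s.length : Int) - p).toNat ≤ k → pvSucc (pvStoneB s) d (s.length : Int) p := by
    intro k
    induction k with
    | zero => intro p hp1 hp2 hp3; exfalso; omega
    | succ k ih =>
      intro p hp1 hp2 hp3
      by_cases hb : (s.length : Int) ≤ p + d
      · exact pvSucc.base p hb
      · obtain ⟨u, hu1, hu2, hu3, hu4⟩ := pad_of_c5 s d hd1 hc5 (p + 1) (by omega) (by omega)
        exact pvSucc.step p u (by omega) (by omega) (stoneOf u (by omega) hu3 hu4)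
          (ih u (by omega) hu3 (by omega))
  have hsucc0 : pvSucc (pvStoneB s) d (s.length : Int) 0 := by
    by_cases hdn' : (s.length : Int) ≤ d
    · exact pvSucc.base 0 (by omega)
    · obtain ⟨u, hu1, hu2, hu3, hu4⟩ := pad_of_c5 s d hd1 hc5 1 (by omega) (by omega)
      have hud : u = d := by
        by_contra hne
        have hf := no_pad_of_c3 s d hc3 u (by omega) (by omega) hu3
        rw [hf] at hu4
        exact absurd hu4 (by decide)
      subst hud
      exact pvSucc.step 0 u (by omega) (by omega) (stoneOf u (by omega) hu3 hu4)
        (reach ((s.length : Int) - u).toNat u (by omega) hu3 le_rfl)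
  exact pvSucc.step (-1) 0 (by omega) (by omega) hst0 hsucc0

theorem D_to_not_succA (d : Int) (s : String) (hD : D_check_jump d s) :
    ¬ pvSucc (pvStoneA s) d (s.length : Int) (-1) := by
  obtain ⟨h0, hc3, hc5⟩ := hD
  obtain ⟨hd1, hdn, hn⟩ := D_bounds d s h0 hc3 hc5
  rw [List.head?_eq_getElem?] at h0
  have hc0 : pvCharAt s 0 = 'L' := by
    unfold pvCharAt
    rw [show (0 : Int) = ((0 : Nat) : Int) from rfl, PySem.Str.pyGet?_natCast, h0]
    rfl
  intro h
  cases h with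
  | base _ hb => omega
  | step _ t h1 h2 hst hsucc =>
    have ht0 : 0 ≤ t := hst.1
    have htn : t < (s.length : Int) := hst.2.1
    by_cases hteq : t = 0
    · subst hteq
      rcases hst.2.2 with hR | ⟨_, hne⟩
      · rw [hc0] at hR; exact absurd hR (by decide)
      · exact hne rfl
    · have hf := no_pad_of_c3 s d hc3 t (by omega) (by omega) htn
      have hp : pvPad (pvCharAt s t) = true := by
        rw [padChar_iff]
        rcases hst.2.2 with h | h
        · exact Or.inr h
        · exact Or.inl h.1
      rw [hf] at hp
      exact absurd hp (by decide)

theorem diff_to_D (d : Int) (s : String)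
    (hB : pvSucc (pvStoneB s) d (s.length : Int) (-1))
    (hA : ¬ pvSucc (pvStoneA s) d (s.length : Int) (-1)) : D_check_jump d s := by
  cases hB with
  | base _ hb => exact absurd (pvSucc.base _ hb) hA
  | step _ t0 h1 h2 hst0 hsucc0 =>
    have ht00 : t0 = 0 ∧ pvCharAt s t0 = 'L' := by
      by_contra hcon
      apply hA
      refine pvSucc.step (-1) t0 h1 h2 ⟨hst0.1, hst0.2.1, ?_⟩
        (succB_to_succA s d (s.length : Int) t0 hsucc0 hst0.1)
      rcases hst0.2.2 with hR | hL
      · exact Or.inl hR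
      · exact Or.inr ⟨hL, fun h => hcon ⟨h, hL⟩⟩
    obtain ⟨ht0eq, hcL⟩ := ht00
    subst ht0eq
    have hd1 : (1 : Int) ≤ d := by omega
    have h0n : (0 : Int) < (s.length : Int) := hst0.2.1
    have hdn : d ≤ (s.length : Int) := by
      by_contra h
      exact hA (pvSucc.base _ (by omega))
    have hget0 : s.toList.head? = some 'L' := by
      rw [List.head?_eq_getElem?]
      have hg := charAt_get s 0 le_rfl h0n
      rw [show (0 : Int) = ((0 : Nat) : Int) from rfl, PySem.Str.pyGet?_natCast] at hg
      rw [hg]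
      simpa using hcL
    -- no pad at any index in [1, d)
    have hnopadP : ∀ t : Int, 1 ≤ t → t < d → t < (s.length : Int) →
        pvPad (pvCharAt s t) = false := by
      intro t ht1 ht2 ht3
      by_contra hp
      rw [Bool.not_eq_false] at hp
      have hstI : pvStoneA s t := by
        refine ⟨by omega, ht3, ?_⟩
        rcases (padChar_iff _).mp hp with h | h
        · exact Or.inr ⟨h, by omega⟩
        · exact Or.inl h
      have hBi : pvSucc (pvStoneB s) d (s.length : Int) t :=
        pvSucc_mono (pvStoneB s) d (s.length : Int) 0 hsucc0 t (by omega)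
      exact hA (pvSucc.step (-1) t (by omega) (by omega) hstI
        (succB_to_succA s d (s.length : Int) t hBi (by omega)))
    -- a pad at d itself whenever d < len
    have hpadd : d < (s.length : Int) → pvPad (pvCharAt s d) = true := by
      intro hdlt
      cases hsucc0 with
      | base _ hb => exfalso; omega
      | step _ t1 h1' h2' hst1 _ =>
        have ht1d : t1 = d := by
          by_contra hne
          have hf := hnopadP t1 (by omega) (by omega) hst1.2.1
          have hp : pvPad (pvCharAt s t1) = true := by
            rw [padChar_iff]
            rcases hst1.2.2 with h | h
            · exact Or.inr h
            · exact Or.inl h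
          rw [hf] at hp
          exact absurd hp (by decide)
        subst ht1d
        rw [padChar_iff]
        rcases hst1.2.2 with h | h
        · exact Or.inr h
        · exact Or.inl h
    -- every length-d window from a ≥ 1 holds a pad
    have hgapP : ∀ a : Int, 1 ≤ a → a + d ≤ (s.length : Int) →
        ∃ t : Int, a ≤ t ∧ t < a + d ∧ t < (s.length : Int) ∧ pvPad (pvCharAt s t) = true := by
      intro a ha1 ha2
      by_cases hcase : a ≤ d
      · exact ⟨d, hcase, by omega, by omega, hpadd (by omega)⟩
      · by_contra hcon
        push_neg at hcon
        have noCross : ∀ p, pvSucc (pvStoneB s) d (s.length : Int) p → p < a → False := by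
          intro p hp
          induction hp with
          | base p hb => intro hpa; omega
          | step p t hpt htd hst _ ih =>
            intro hpa
            by_cases hta : t < a
            · exact ih hta
            · have hp' : pvPad (pvCharAt s t) = true := by
                rw [padChar_iff]
                rcases hst.2.2 with h | h
                · exact Or.inr h
                · exact Or.inl h
              have := hcon t (by omega) (by omega) hst.2.1
              rw [hp'] at this
              exact absurd this (by decide)
        exact noCross 0 hsucc0 (by omega)
    refine ⟨hget0, ?_, ?_⟩
    · -- the findIdx conjunct, from hnopadP
      by_contra hc
      push_neg at hc
      have hflt : s.toList.tail.findIdx pvPad < s.toList.tail.length := by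
        simp [List.length_tail]
        omega
      have hp := List.findIdx_getElem (w := hflt)
      simp only [List.getElem_tail] at hp
      set j := s.toList.tail.findIdx pvPad with hj
      have hf := hnopadP ((j : Int) + 1) (by omega) (by omega) (by simp at hflt ⊢; omega)
      rw [charAt_getElem s ((j : Int) + 1) (by omega) (by simp at hflt ⊢; omega)] at hf
      simp only [show ((j : Int) + 1).toNat = j + 1 by omega] at hf
      exact absurd (hp.symm.trans hf) (by decide)
    · -- the window conjunct, from hgapP and the pad at 0
      intro a ha
      rcases Nat.eq_zero_or_pos a with ha0 | ha1
      · subst ha0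
        obtain ⟨tl, htl⟩ := List.head?_eq_some_iff.mp hget0
        obtain ⟨k, hk⟩ : ∃ k, d.toNat = k + 1 := ⟨d.toNat - 1, by omega⟩
        rw [List.drop_zero, htl, hk, List.take_succ_cons]
        simp [pvPad]
      · obtain ⟨u, hu1, hu2, hu3, hu4⟩ := hgapP a (by omega) (by omega)
        rw [List.any_eq_true]
        have hult : u.toNat < s.toList.length := by simp; omega
        have hjlt : u.toNat - a < ((s.toList.drop a).take d.toNat).length := by simp; omega
        refine ⟨((s.toList.drop a).take d.toNat)[u.toNat - a]'hjlt, List.getElem_mem hjlt, ?_⟩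
        simp only [List.getElem_take, List.getElem_drop]
        rw [charAt_getElem s u (by omega) hult] at hu4
        simp only [show a + (u.toNat - a) = u.toNat by omega]
        exact hu4
theorem AB_eq_of_notD (d : Int) (s : String) (h : ¬ D_check_jump d s) :
    check_jump d s = check_jump_alt d s := by
  by_cases hB : pvSucc (pvStoneB s) d (s.length : Int) (-1)
  · by_cases hA : pvSucc (pvStoneA s) d (s.length : Int) (-1)
    · rw [(A_iff d s).mpr hA, (B_iff d s).mpr hB]
    · exact absurd (diff_to_D d s hB hA) h
  · have hA : ¬ pvSucc (pvStoneA s) d (s.length : Int) (-1) :=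
      fun h' => hB (succA_to_succB s d (s.length : Int) (-1) h')
    rw [Bool.eq_false_iff.mpr (fun hh => hA ((A_iff d s).mp hh)),
      Bool.eq_false_iff.mpr (fun hh => hB ((B_iff d s).mp hh))]

-- ===== VERDICT (by name: the statements are the Claim_ definitions above) =====
theorem check_jump_spec : Claim_unchanged_check_jump := by
  intro d jump_arr _
  unfold Spec_check_jump
  intro hnD
  exact AB_eq_of_notD d jump_arr hnD

theorem check_jump_changed : Claim_changed_check_jump := by
  unfold Claim_changed_check_jump; decide

theorem check_jump_tight : Claim_exact_check_jump := by
  intro d jump_arr _ hD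
  have hA : check_jump d jump_arr ≠ true :=
    fun h => D_to_not_succA d jump_arr hD ((A_iff d jump_arr).mp h)
  have hB : check_jump_alt d jump_arr = true := (B_iff d jump_arr).mpr (D_to_succB d jump_arr hD)
  intro heq
  exact hA (by rw [heq, hB])
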